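-- pv_equiv track=rewrite | github.com/abc5051001/Check-descendants | descendants.py | descendants
-- ===== SOURCE A (Python) =====
-- def descendants(family_tree, name, distance):
-- 	final = []
-- 	empty = []
-- 	if distance == 0:
-- 		empty.append(name)
-- 		return empty
-- # base case
-- 	else:
-- 		for x in family_tree[name]:
-- # x is the person
-- 			if x in family_tree or distance == 1:
-- 				final.extend(descendants(family_tree,x,distance-1))
-- # recursive function to run until distance is 0
-- 		return final
-- ===== SOURCE B (Python) =====
-- def descendants(family_tree, name, distance):
--     if distance == 0:
--         return [name]
--     level = [name]
--     for _ in range(distance - 1):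
--         level = [x for n in level for x in family_tree[n] if x in family_tree]
--     return [x for n in level for x in family_tree[n]]
-- ===== Notes on version B (the rewrite author's own statement) =====
-- stated objective: alternative
-- what changed: Replaces the depth-first recursion carrying a decrementing distance by staged passes: distance-1 key-filtered expansion passes on a frontier list followed by one final take-all-children pass, with the distance==0 base handled up front.
-- outside the precondition, e.g. on descendants({'a': ['b']}, 'a', -1): A returns [], B returns ['b']; on descendants({'a': ['b']}, 'b', 1): A raises KeyError, B raises KeyError
import Mathlib
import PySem

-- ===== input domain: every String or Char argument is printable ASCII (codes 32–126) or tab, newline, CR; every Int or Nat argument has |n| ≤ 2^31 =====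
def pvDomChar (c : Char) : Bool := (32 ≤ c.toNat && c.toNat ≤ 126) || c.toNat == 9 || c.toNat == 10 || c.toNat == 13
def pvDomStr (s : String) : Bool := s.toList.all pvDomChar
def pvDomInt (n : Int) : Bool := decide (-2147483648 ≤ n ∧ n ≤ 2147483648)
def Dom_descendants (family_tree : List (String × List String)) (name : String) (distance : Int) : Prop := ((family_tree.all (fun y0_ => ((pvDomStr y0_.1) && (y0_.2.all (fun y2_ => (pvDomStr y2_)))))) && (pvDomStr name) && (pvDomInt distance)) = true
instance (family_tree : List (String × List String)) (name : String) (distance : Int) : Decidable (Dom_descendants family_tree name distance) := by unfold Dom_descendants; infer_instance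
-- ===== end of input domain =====

-- B replaces A's depth-first recursion by staged frontier passes (distance-1 key-filtered expansions,
-- then one take-all-children pass); objective: alternative decomposition, same cost.

-- ===== PORT A =====
-- A's recursion decrements `distance`; inside Pre_ (0 ≤ distance) `distance.toNat` is exact fuel,
-- so `descA` transcribes A step for step on every admitted input (fuel 0 is unreachable there).
def descA (family_tree : List (String × List String)) : Nat → String → Int → List String
  | fuel, name, distance =>
    if distance = 0 then [name]
    else
      match fuel with
      | 0 => []
      | f + 1 =>
        ((PySem.Dict.ofList family_tree).getD name []).foldl
          (fun final x =>
            if (PySem.Dict.ofList family_tree).contains x || distance == 1 then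
              final ++ descA family_tree f x (distance - 1)
            else final) []

def descendants (family_tree : List (String × List String)) (name : String) (distance : Int) : List String :=
  descA family_tree distance.toNat name distance

-- ===== PORT B =====
-- one pass of Source B's for-loop body: expand the frontier, keeping only children that are keys
def expandKeys (family_tree : List (String × List String)) (level : List String) : List String :=
  level.flatMap (fun n =>
    ((PySem.Dict.ofList family_tree).getD n []).filter
      (fun x => (PySem.Dict.ofList family_tree).contains x))

-- Source B's `for _ in range(distance - 1)` loop, as a Nat recursion on the iteration count
def iterExpand (family_tree : List (String × List String)) : Nat → List String → List String
  | 0, level => level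
  | m + 1, level => iterExpand family_tree m (expandKeys family_tree level)

def descendants_alt (family_tree : List (String × List String)) (name : String) (distance : Int) : List String :=
  if distance = 0 then [name]
  else
    (iterExpand family_tree (distance - 1).toNat [name]).flatMap
      (fun n => (PySem.Dict.ofList family_tree).getD n [])

-- ===== PRECONDITION & SPEC =====
-- Pre_ excludes (a) negative distance — outside the task's natural domain; there A raises
-- (KeyError/RecursionError) or returns [] purely by accident of its unbounded recursion, while B's
-- staged passes naturally return the children of the frontier — and (b) distance ≠ 0 with name not a
-- key, where both A and B raise KeyError.
def Pre_descendants (family_tree : List (String × List String)) (name : String) (distance : Int) : Prop :=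
  0 ≤ distance ∧ (distance = 0 ∨ (PySem.Dict.ofList family_tree).contains name = true)
instance (family_tree : List (String × List String)) (name : String) (distance : Int) : Decidable (Pre_descendants family_tree name distance) := by unfold Pre_descendants; infer_instance

def pvWitness_descendants : (List (String × List String)) × String × Int :=
  ([("a", ["b", "c"]), ("b", ["d"])], "a", 2)

def Spec_descendants (family_tree : List (String × List String)) (name : String) (distance : Int) (out : List String) : Prop := out = descendants_alt family_tree name distance
instance (family_tree : List (String × List String)) (name : String) (distance : Int) (out : List String) : Decidable (Spec_descendants family_tree name distance out) := by unfold Spec_descendants; infer_instance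

-- ===== CLAIM (what is proved, stated in full; the proofs are below) =====
def Claim_equal_descendants : Prop := ∀ (family_tree : List (String × List String)) (name : String) (distance : Int), Dom_descendants family_tree name distance → Pre_descendants family_tree name distance → Spec_descendants family_tree name distance (descendants family_tree name distance)

-- ===== LEMMAS AND PROOFS =====

-- Core invariant: concatenating the DFS results of a whole frontier at remaining distance m+1
-- equals m key-filtered expansion passes followed by the take-all-children pass.
lemma descA_frontier (family_tree : List (String × List String)) :
    ∀ (m : Nat) (level : List String),
      level.flatMap (fun n => descA family_tree (m + 1) n ((m : Int) + 1)) =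
        (iterExpand family_tree m level).flatMap
          (fun n => (PySem.Dict.ofList family_tree).getD n []) := by
  intro m
  induction m with
  | zero =>
    intro level
    simp only [iterExpand]
    refine List.flatMap_congr (fun n _ => ?_)
    rw [descA]
    norm_num
    simp [descA]
    exact List.flatMap_singleton' _
  | succ m ih =>
    intro level
    have hne : ((m : Int) + 1 + 1) ≠ 0 := by positivity
    have hstep : ∀ n : String,
        descA family_tree (m + 1 + 1) n ((m : Int) + 1 + 1) =
          (((PySem.Dict.ofList family_tree).getD n []).filter
            (fun x => (PySem.Dict.ofList family_tree).contains x)).flatMap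
            (fun x => descA family_tree (m + 1) x ((m : Int) + 1)) := by
      intro n
      rw [descA, if_neg hne]
      rw [PySem.List.foldl_if_eq_foldl_filter
        (p := fun x => (PySem.Dict.ofList family_tree).contains x || ((m : Int) + 1 + 1) == 1)
        (f := fun acc x => acc ++ descA family_tree (m + 1) x ((m : Int) + 1 + 1 - 1))]
      rw [PySem.List.foldl_append_eq_flatMap]
      have h1 : (((m : Int) + 1 + 1) == 1) = false := by
        simp; omega
      simp only [h1, Bool.or_false]
      norm_num
    calc level.flatMap (fun n => descA family_tree (m + 1 + 1) n ((m : Int) + 1 + 1))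
        = (expandKeys family_tree level).flatMap
            (fun x => descA family_tree (m + 1) x ((m : Int) + 1)) := by
          unfold expandKeys
          rw [List.flatMap_assoc]
          exact List.flatMap_congr (fun n _ => hstep n)
      _ = _ := by rw [ih]; rfl

theorem descendants_spec : Claim_equal_descendants := by
  intro family_tree name distance _hdom hpre
  unfold Spec_descendants descendants descendants_alt
  obtain ⟨hd, _⟩ := hpre
  by_cases h0 : distance = 0
  · subst h0; simp [descA]
  · rw [if_neg h0]
    have hm : ∃ m : Nat, distance = (m : Int) + 1 := ⟨(distance - 1).toNat, by omega⟩
    obtain ⟨m, hm⟩ := hm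
    have h1 : distance.toNat = m + 1 := by omega
    have h2 : (distance - 1).toNat = m := by omega
    rw [h1, h2, hm]
    have := descA_frontier family_tree m [name]
    simpa using this
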